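-- pv_equiv track=rewrite | github.com/Roblyat/payload_estimation | services/evaluation/scripts/delan_metrics_boxplots.py | _strip_any_prefixes
-- ===== SOURCE A (Python) =====
-- from typing import Any, Dict, List, Optional, Tuple
--
-- def _prefix_variants(pref: str) -> List[str]:
--     variants = [pref]
--     if pref.startswith("delan_"):
--         variants.append(pref[len("delan_"):])
--     else:
--         variants.append(f"delan_{pref}")
--     return variants
--
-- def _strip_any_prefixes(labels: List[str], prefixes: List[str]) -> Tuple[List[str], List[str]]:
--     if not prefixes:
--         return labels, []
--     removed: List[str] = []
--     out: List[str] = []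
--     for s in labels:
--         stripped = s
--         used = None
--         for p in prefixes:
--             for v in _prefix_variants(p):
--                 if stripped.startswith(v):
--                     stripped = stripped[len(v):]
--                     used = p
--                     break
--             if used:
--                 break
--         if used:
--             removed.append(used)
--         out.append(stripped)
--     # de-dup but keep order
--     seen = set()
--     dedup = []
--     for p in removed:
--         if p not in seen:
--             seen.add(p)
--             dedup.append(p)
--     return out, dedup
-- ===== SOURCE B (Python) =====
-- from typing import List, Tuple
--
-- def _strip_any_prefixes(labels: List[str], prefixes: List[str]) -> Tuple[List[str], List[str]]:
--     # Prefix-major multi-pass: instead of scanning the prefixes per label, sweep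
--     # each prefix variant over a shrinking set of still-unmatched label indices,
--     # recording the strip and the prefix used in per-label slots.
--     n = len(labels)
--     out = list(labels)
--     used: List = [None] * n
--     pending = list(range(n))
--     for p in prefixes:
--         if not p:
--             continue  # an empty prefix strips nothing
--         variants = (p, p[len("delan_"):]) if p.startswith("delan_") else (p, "delan_" + p)
--         for v in variants:
--             if not pending:
--                 break
--             still = []
--             for i in pending:
--                 if labels[i].startswith(v):
--                     out[i] = labels[i][len(v):]
--                     used[i] = p
--                 else:
--                     still.append(i)
--             pending = still
--     removed = list(dict.fromkeys(u for u in used if u is not None))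
--     return out, removed
-- ===== Notes on version B (the rewrite author's own statement) =====
-- stated objective: alternative
-- what changed: Inverts the loop nesting: instead of A's label-major nested scan over prefixes and per-label recomputed variants, B sweeps each prefix variant (prefix-major) over a shrinking pending set of still-unmatched label indices, filling out/used slot arrays, then collects and order-dedups the used prefixes in one final pass.
import Mathlib
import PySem

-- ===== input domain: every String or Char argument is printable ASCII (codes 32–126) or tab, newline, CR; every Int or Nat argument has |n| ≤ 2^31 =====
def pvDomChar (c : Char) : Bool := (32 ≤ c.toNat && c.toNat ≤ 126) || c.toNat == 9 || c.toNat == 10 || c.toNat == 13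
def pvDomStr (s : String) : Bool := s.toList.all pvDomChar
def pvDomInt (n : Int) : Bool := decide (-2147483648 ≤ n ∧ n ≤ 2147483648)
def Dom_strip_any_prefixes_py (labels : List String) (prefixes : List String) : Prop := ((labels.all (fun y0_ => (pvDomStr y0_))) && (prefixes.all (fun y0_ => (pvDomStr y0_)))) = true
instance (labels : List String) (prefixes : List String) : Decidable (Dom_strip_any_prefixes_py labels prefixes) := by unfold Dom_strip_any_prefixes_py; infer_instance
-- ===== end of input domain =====

-- B inverts the loop nesting: it sweeps each prefix variant over a shrinking pending set of
-- unmatched label indices (filling out/used slots), instead of A's label-major nested scan;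
-- return value only, neither implementation mutates its arguments.

-- ===== PORT A =====
-- _prefix_variants
def pvVariantsA (pref : String) : List String :=
  if PySem.Str.startswith pref "delan_" then
    [pref, PySem.Str.slice pref (some (PySem.Str.len "delan_")) none]
  else
    -- f"delan_{pref}" : string concatenation, exact on code points
    [pref, String.ofList ("delan_".toList ++ pref.toList)]

-- Python truthiness of 'used' (None or a str)
def pvTruthy (u : Option String) : Bool := match u with | none => false | some s => s ≠ ""

-- inner loop: for v in _prefix_variants(p): if stripped.startswith(v): strip, used = p, break
def pvInnerA (stripped : String) (p : String) : List String → String × Option String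
  | [] => (stripped, none)
  | v :: vs =>
    if PySem.Str.startswith stripped v then
      (PySem.Str.slice stripped (some (PySem.Str.len v)) none, some p)
    else pvInnerA stripped p vs

-- outer loop: for p in prefixes: … ; if used: break
def pvOuterA (stripped : String) (used : Option String) : List String → String × Option String
  | [] => (stripped, used)
  | p :: ps =>
    let r := pvInnerA stripped p (pvVariantsA p)
    let us := match r.2 with | some u => some u | none => used
    if pvTruthy us then (r.1, us) else pvOuterA r.1 us ps

def strip_any_prefixes_py (labels : List String) (prefixes : List String) : List String × List String :=
  if prefixes = [] then (labels, []) else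
  let res := labels.foldl (fun (acc : List String × List String) s =>
    let r := pvOuterA s none prefixes
    (acc.1 ++ [r.1], if pvTruthy r.2 then acc.2 ++ [r.2.getD ""] else acc.2)) ([], [])
  -- de-dup but keep order, via a 'seen' set
  let dd := res.2.foldl (fun (sd : PySem.Set String × List String) p =>
    if PySem.Set.contains sd.1 p then sd else (PySem.Set.add sd.1 p, sd.2 ++ [p]))
    (PySem.Set.empty, [])
  (res.1, dd.2)

-- ===== PORT B =====
-- one sweep of variant v (of prefix p) over the pending indices; state σ = (out, used, pending)
def pvBPass (labels : List String) (p v : String)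
    (σ : List String × List (Option String) × List Nat) :
    List String × List (Option String) × List Nat :=
  if σ.2.2 = [] then σ else  -- if not pending: break
  σ.2.2.foldl
    (fun (acc : List String × List (Option String) × List Nat) i =>
      if PySem.Str.startswith (labels.getD i "") v then
        (acc.1.set i (PySem.Str.slice (labels.getD i "") (some (PySem.Str.len v)) none),
         acc.2.1.set i (some p), acc.2.2)
      else (acc.1, acc.2.1, acc.2.2 ++ [i]))
    (σ.1, σ.2.1, [])

def strip_any_prefixes_py_alt (labels : List String) (prefixes : List String) : List String × List String :=
  let final := prefixes.foldl (fun σ p =>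
      if p = "" then σ  -- an empty prefix strips nothing
      else  -- variants = (p, p[len("delan_"):]) if p.startswith("delan_") else (p, "delan_" + p)
        (if PySem.Str.startswith p "delan_" then
           [p, PySem.Str.slice p (some (PySem.Str.len "delan_")) none]
         else [p, String.ofList ("delan_".toList ++ p.toList)]).foldl
          (fun σ v => pvBPass labels p v σ) σ)
    (labels, List.replicate labels.length none, List.range labels.length)
  (final.1, PySem.List.dedup (final.2.1.filterMap id))

-- ===== PRECONDITION & SPEC =====
def Spec_strip_any_prefixes_py (labels : List String) (prefixes : List String) (out : List String × List String) : Prop := out = strip_any_prefixes_py_alt labels prefixes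
instance (labels : List String) (prefixes : List String) (out : List String × List String) : Decidable (Spec_strip_any_prefixes_py labels prefixes out) := by unfold Spec_strip_any_prefixes_py; infer_instance

-- ===== CLAIM (what is proved, stated in full; the proofs are below) =====
def Claim_equal_strip_any_prefixes_py : Prop := ∀ (labels : List String) (prefixes : List String), Dom_strip_any_prefixes_py labels prefixes → Spec_strip_any_prefixes_py labels prefixes (strip_any_prefixes_py labels prefixes)

-- ===== LEMMAS AND PROOFS =====

-- the delan_-toggled variant (shared shape of both ports' second variant)
def pvAlt (p : String) : String :=
  if PySem.Str.startswith p "delan_" then PySem.Str.slice p (some (PySem.Str.len "delan_")) none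
  else String.ofList ("delan_".toList ++ p.toList)

-- the flat ordered (variant, prefix) table both ports effectively scan
def pvEntries : List String → List (String × String)
  | [] => []
  | p :: ps => (if p = "" then [] else [(p, p), (pvAlt p, p)]) ++ pvEntries ps

-- first table entry whose variant is a prefix of s, with the stripped remainder
def pvScan (s : String) : List (String × String) → Option (String × String)
  | [] => none
  | (v, p) :: t =>
    if PySem.Str.startswith s v then
      some (PySem.Str.slice s (some (PySem.Str.len v)) none, p)
    else pvScan s t

def pvF (done : List (String × String)) (s : String) : String :=
  match pvScan s done with | some (st, _) => st | none => s
def pvG (done : List (String × String)) (s : String) : Option String :=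
  (pvScan s done).map Prod.snd
def pvPend (labels : List String) (done : List (String × String)) : List Nat :=
  (List.range labels.length).filter (fun i => (pvScan (labels.getD i "") done).isNone)
def pvState (labels : List String) (done : List (String × String)) :
    List String × List (Option String) × List Nat :=
  (labels.map (pvF done), labels.map (pvG done), pvPend labels done)

lemma pv_variants_eq (p : String) : pvVariantsA p = [p, pvAlt p] := by
  unfold pvVariantsA pvAlt; split <;> rfl

lemma pv_bvariants_eq (p : String) :
    (if PySem.Str.startswith p "delan_" then
       [p, PySem.Str.slice p (some (PySem.Str.len "delan_")) none]
     else [p, String.ofList ("delan_".toList ++ p.toList)]) = [p, pvAlt p] := by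
  unfold pvAlt; split <;> rfl

lemma pv_entries_cons (p : String) (ps : List String) (hp : p ≠ "") :
    pvEntries (p :: ps) = (p, p) :: (pvAlt p, p) :: pvEntries ps := by
  simp [pvEntries, hp]

lemma pv_entries_empty_cons (ps : List String) : pvEntries ("" :: ps) = pvEntries ps := by
  simp [pvEntries]

lemma pv_scan_append (s : String) (d e : List (String × String)) :
    pvScan s (d ++ e) = match pvScan s d with | some r => some r | none => pvScan s e := by
  induction d with
  | nil => simp [pvScan]
  | cons vp d ih =>
    obtain ⟨v, p⟩ := vp
    simp only [List.cons_append, pvScan]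
    split
    · rfl
    · exact ih

-- stripping a length-0 prefix is the identity
lemma pv_slice_zero (s : String) : PySem.Str.slice s (some 0) none = s := by
  simp [PySem.Str.slice, PySem.Chars.slice_eq_listSlice]

lemma pv_chars_startswith_nil (l : List Char) : PySem.Chars.startswith l [] = true := by
  simp [PySem.Chars.startswith_iff]

-- ===== A-side: the observable part of A's per-label state equals a scan of the table =====
lemma pv_outer_scan (ps : List String) (s : String) (u : Option String)
    (hu : pvTruthy u = false) :
    (match pvScan s (pvEntries ps) with
      | some (st, p) => pvOuterA s u ps = (st, some p) ∧ p ≠ ""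
      | none => (pvOuterA s u ps).1 = s ∧ pvTruthy (pvOuterA s u ps).2 = false) := by
  induction ps generalizing s u with
  | nil => simp [pvOuterA, pvEntries, pvScan, hu]
  | cons p ps ih =>
    by_cases hp : p = ""
    · subst hp
      rw [pv_entries_empty_cons]
      have hv : pvVariantsA "" = ["", "delan_"] := by decide
      have hstep : pvOuterA s u ("" :: ps) = pvOuterA s (some "") ps := by
        simp [pvOuterA, hv, pvInnerA, pvTruthy, pv_chars_startswith_nil, pv_slice_zero]
      rw [hstep]
      exact ih s (some "") (by simp [pvTruthy])
    · rw [pv_entries_cons p ps hp]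
      by_cases h1 : PySem.Chars.startswith s.toList p.toList = true
      · have hscan : pvScan s ((p, p) :: (pvAlt p, p) :: pvEntries ps)
            = some (PySem.Str.slice s (some (PySem.Str.len p)) none, p) := by
          simp [pvScan, h1]
        rw [hscan]
        refine ⟨?_, hp⟩
        simp [pvOuterA, pv_variants_eq, pvInnerA, h1, pvTruthy, hp]
      · by_cases h2 : PySem.Chars.startswith s.toList (pvAlt p).toList = true
        · have hscan : pvScan s ((p, p) :: (pvAlt p, p) :: pvEntries ps)
              = some (PySem.Str.slice s (some (PySem.Str.len (pvAlt p))) none, p) := by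
            simp [pvScan, h1, h2]
          rw [hscan]
          refine ⟨?_, hp⟩
          simp [pvOuterA, pv_variants_eq, pvInnerA, h1, h2, pvTruthy, hp]
        · have hscan : pvScan s ((p, p) :: (pvAlt p, p) :: pvEntries ps)
              = pvScan s (pvEntries ps) := by
            simp [pvScan, h1, h2]
          rw [hscan]
          have hstep : pvOuterA s u (p :: ps) = pvOuterA s u ps := by
            simp [pvOuterA, pv_variants_eq, pvInnerA, h1, h2, hu]
          rw [hstep]
          exact ih s u hu

-- A's label fold equals map/filterMap through the table scan
lemma pv_fold_map (T : List (String × String)) (labels : List String)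
    (acc : List String × List String) :
    labels.foldl (fun (acc : List String × List String) s =>
      match pvScan s T with
      | some (st, p) => (acc.1 ++ [st], acc.2 ++ [p])
      | none => (acc.1 ++ [s], acc.2)) acc
    = (acc.1 ++ labels.map (pvF T), acc.2 ++ labels.filterMap (pvG T)) := by
  induction labels generalizing acc with
  | nil => simp
  | cons s ls ih =>
    simp only [List.foldl, List.map, List.filterMap]
    cases hscan : pvScan s T with
    | some vp => obtain ⟨st, p⟩ := vp; rw [ih]; simp [pvF, pvG, hscan]
    | none => rw [ih]; simp [pvF, pvG, hscan]

lemma pv_step_eq (prefixes : List String) (acc : List String × List String) (s : String) :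
    (let r := pvOuterA s none prefixes
     (acc.1 ++ [r.1], if pvTruthy r.2 then acc.2 ++ [r.2.getD ""] else acc.2)) =
    (match pvScan s (pvEntries prefixes) with
      | some (st, p) => (acc.1 ++ [st], acc.2 ++ [p])
      | none => (acc.1 ++ [s], acc.2)) := by
  have h := pv_outer_scan prefixes s none rfl
  cases hscan : pvScan s (pvEntries prefixes) with
  | some vp =>
    obtain ⟨st, p⟩ := vp
    rw [hscan] at h
    obtain ⟨heq, hne⟩ := h
    simp [heq, pvTruthy, hne]
  | none =>
    rw [hscan] at h
    obtain ⟨h1, h2⟩ := h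
    simp only [h2, if_false, Bool.false_eq_true, h1]

-- A's seen-set fold is Python's dict.fromkeys dedup
lemma pv_dedup_eq (rs : List String) (acc : List String) :
    (rs.foldl (fun (sd : PySem.Set String × List String) p =>
      if PySem.Set.contains sd.1 p then sd else (PySem.Set.add sd.1 p, sd.2 ++ [p]))
      (acc, acc)).2 = rs.foldl PySem.Set.add acc := by
  induction rs generalizing acc with
  | nil => rfl
  | cons r rs ih =>
    simp only [List.foldl]
    by_cases hc : PySem.Set.contains acc r
    · simp only [hc, if_true, PySem.Set.add]
      exact ih acc
    · simp only [hc, PySem.Set.add]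
      exact ih (acc ++ [r])

-- ===== B-side: the sweep maintains pvState =====

-- a fold of guarded List.set's, read back pointwise
lemma pv_setfold_get {α : Type} (c : Nat → Bool) (g : Nat → α) (L : List Nat)
    (out : List α) (j : Nat) (h : ∀ i ∈ L, i < out.length) :
    (L.foldl (fun o i => if c i then o.set i (g i) else o) out)[j]? =
    if j ∈ L ∧ c j = true then some (g j) else out[j]? := by
  induction L generalizing out with
  | nil => simp
  | cons i L ih =>
    have hi : i < out.length := h i (List.mem_cons_self)
    by_cases hci : c i = true
    · have h' : ∀ k ∈ L, k < (out.set i (g i)).length := by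
        intro k hk; simpa using h k (List.mem_cons_of_mem _ hk)
      simp only [List.foldl, hci, if_true]
      rw [ih _ h']
      by_cases hj : j ∈ L ∧ c j = true
      · simp [hj]
      · simp only [hj, if_false]
        rw [List.getElem?_set]
        by_cases hji : i = j
        · have hcj : c j = true := hji ▸ hci
          have hmem : j ∈ i :: L := hji ▸ List.mem_cons_self
          rw [if_pos hji, if_pos hi, if_pos ⟨hmem, hcj⟩, ← hji]
        · have hcond : ¬ (j ∈ i :: L ∧ c j = true) := by
            rintro ⟨hm, hc⟩
            rcases List.mem_cons.mp hm with rfl | hm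
            · exact hji rfl
            · exact hj ⟨hm, hc⟩
          rw [if_neg hji, if_neg hcond]
    · simp only [List.foldl, if_neg hci]
      rw [ih _ (fun k hk => h k (List.mem_cons_of_mem _ hk))]
      have hiff : (j ∈ i :: L ∧ c j = true) ↔ (j ∈ L ∧ c j = true) := by
        constructor
        · rintro ⟨hm, hc⟩
          rcases List.mem_cons.mp hm with rfl | hm
          · exact absurd hc hci
          · exact ⟨hm, hc⟩
        · exact fun ⟨hm, hc⟩ => ⟨List.mem_cons_of_mem _ hm, hc⟩
      by_cases hj : j ∈ L ∧ c j = true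
      · rw [if_pos hj, if_pos (hiff.mpr hj)]
      · rw [if_neg hj, if_neg (fun hc => hj (hiff.mp hc))]

lemma pv_mem_pend (labels : List String) (done : List (String × String)) (j : Nat) :
    j ∈ pvPend labels done ↔
      j < labels.length ∧ (pvScan (labels.getD j "") done).isNone = true := by
  simp [pvPend, List.mem_filter, List.mem_range]

-- the per-slot sweep turns state(done) into state(done ++ [(v,p)]), for any slot read-out h
lemma pv_map_step {β : Type} (labels : List String) (done : List (String × String))
    (v p : String) (h : String → Option (String × String) → β) :
    (pvPend labels done).foldl (fun o i =>
        if PySem.Str.startswith (labels.getD i "") v then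
          o.set i (h (labels.getD i "")
            (some (PySem.Str.slice (labels.getD i "") (some (PySem.Str.len v)) none, p)))
        else o)
      (labels.map (fun s => h s (pvScan s done)))
    = labels.map (fun s => h s (pvScan s (done ++ [(v, p)]))) := by
  apply List.ext_getElem?
  intro j
  rw [pv_setfold_get (fun i => PySem.Str.startswith (labels.getD i "") v)
    (fun i => h (labels.getD i "")
      (some (PySem.Str.slice (labels.getD i "") (some (PySem.Str.len v)) none, p)))
    _ _ j (by intro i hi; rw [List.length_map]; exact ((pv_mem_pend labels done i).mp hi).1)]
  by_cases hj : j < labels.length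
  · have hgd : labels.getD j "" = labels[j] := List.getD_eq_getElem labels "" hj
    rw [hgd, List.getElem?_map, List.getElem?_map, List.getElem?_eq_getElem hj,
        Option.map_some, Option.map_some, pv_scan_append]
    cases hscan : pvScan labels[j] done with
    | some r =>
      have hnm : ¬ (j ∈ pvPend labels done ∧ PySem.Str.startswith labels[j] v = true) := by
        rintro ⟨hm, -⟩
        have h2 := ((pv_mem_pend labels done j).mp hm).2
        rw [hgd, hscan] at h2
        simp at h2
      rw [if_neg hnm]
    | none =>
      have hm : j ∈ pvPend labels done :=
        (pv_mem_pend labels done j).mpr ⟨hj, by rw [hgd, hscan]; rfl⟩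
      by_cases hc : PySem.Str.startswith labels[j] v = true
      · rw [if_pos ⟨hm, hc⟩]
        rw [PySem.Str.startswith_eq] at hc
        simp [pvScan, hc]
      · rw [if_neg (fun hh => hc hh.2)]
        rw [PySem.Str.startswith_eq] at hc
        simp [pvScan, hc]
  · have hnm : ¬ j ∈ pvPend labels done := fun hm =>
      hj ((pv_mem_pend labels done j).mp hm).1
    have hge : labels.length ≤ j := Nat.le_of_not_lt hj
    rw [if_neg (fun hh => hnm hh.1)]
    simp [hge]

lemma pv_pend_step (labels : List String) (done : List (String × String)) (v p : String) :
    (pvPend labels done).filter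
        (fun i => ! PySem.Str.startswith (labels.getD i "") v)
      = pvPend labels (done ++ [(v, p)]) := by
  unfold pvPend
  rw [List.filter_filter]
  apply List.filter_congr
  intro i _
  rw [pv_scan_append]
  cases hscan : pvScan (labels.getD i "") done with
  | some r => simp
  | none =>
    by_cases hc : PySem.Chars.startswith (labels[i]?.getD "").toList v.toList = true <;>
      simp [pvScan, hc]

-- the inner per-index fold, split into its three components
lemma pv_inner_split (labels : List String) (v p : String) (L : List Nat)
    (out : List String) (used : List (Option String)) (still : List Nat) :
    L.foldl (fun (acc : List String × List (Option String) × List Nat) i =>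
      if PySem.Str.startswith (labels.getD i "") v then
        (acc.1.set i (PySem.Str.slice (labels.getD i "") (some (PySem.Str.len v)) none),
         acc.2.1.set i (some p), acc.2.2)
      else (acc.1, acc.2.1, acc.2.2 ++ [i])) (out, used, still)
    = (L.foldl (fun o i => if PySem.Str.startswith (labels.getD i "") v then
          o.set i (PySem.Str.slice (labels.getD i "") (some (PySem.Str.len v)) none) else o) out,
       L.foldl (fun u i => if PySem.Str.startswith (labels.getD i "") v then
          u.set i (some p) else u) used,
       still ++ L.filter (fun i => ! PySem.Str.startswith (labels.getD i "") v)) := by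
  induction L generalizing out used still with
  | nil => simp
  | cons i L ih =>
    by_cases hc : PySem.Str.startswith (labels.getD i "") v = true
    · simp only [List.foldl, List.filter, hc, if_true]
      exact ih _ _ _
    · simp only [List.foldl, List.filter, hc]
      rw [ih]
      simp [List.append_assoc]

lemma pv_pass_step (labels : List String) (done : List (String × String)) (v p : String) :
    pvBPass labels p v (pvState labels done) = pvState labels (done ++ [(v, p)]) := by
  have hout := pv_map_step labels done v p
    (fun s o => match o with | some (st, _) => st | none => s)
  have hused := pv_map_step labels done v p (fun _ o => o.map Prod.snd)
  have hpend := pv_pend_step labels done v p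
  unfold pvBPass
  by_cases hP : (pvState labels done).2.2 = []
  · rw [if_pos hP]
    have hP' : pvPend labels done = [] := hP
    rw [hP'] at hout hused hpend
    simp only [List.foldl_nil] at hout hused
    simp only [List.filter_nil] at hpend
    show pvState labels done = pvState labels (done ++ [(v, p)])
    unfold pvState
    rw [hP']
    exact Prod.ext hout (Prod.ext hused hpend)
  · rw [if_neg hP]
    show (pvPend labels done).foldl
      (fun (acc : List String × List (Option String) × List Nat) i =>
        if PySem.Str.startswith (labels.getD i "") v then
          (acc.1.set i (PySem.Str.slice (labels.getD i "") (some (PySem.Str.len v)) none),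
           acc.2.1.set i (some p), acc.2.2)
        else (acc.1, acc.2.1, acc.2.2 ++ [i]))
      (labels.map (pvF done), labels.map (pvG done), ([] : List Nat))
      = pvState labels (done ++ [(v, p)])
    rw [pv_inner_split]
    refine Prod.ext ?_ (Prod.ext ?_ ?_)
    · exact hout
    · exact hused
    · simp only [List.nil_append]
      exact hpend

lemma pv_state_init (labels : List String) :
    pvState labels [] = (labels, List.replicate labels.length none, List.range labels.length) := by
  have h1 : pvF [] = fun s => s := rfl
  have h2 : pvG [] = fun _ => (none : Option String) := rfl
  have h3 : (fun i => (pvScan (labels.getD i "") []).isNone) = fun _ => true := rfl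
  unfold pvState pvPend
  rw [h1, h2, h3, List.map_const']
  simp

-- B's nested prefix/variant fold is the entry-by-entry fold over the table
lemma pv_b_fold (labels : List String) (prefixes : List String)
    (done : List (String × String)) :
    prefixes.foldl (fun σ p =>
        if p = "" then σ
        else
          (if PySem.Str.startswith p "delan_" then
             [p, PySem.Str.slice p (some (PySem.Str.len "delan_")) none]
           else [p, String.ofList ("delan_".toList ++ p.toList)]).foldl
            (fun σ v => pvBPass labels p v σ) σ)
      (pvState labels done)
    = pvState labels (done ++ pvEntries prefixes) := by
  induction prefixes generalizing done with
  | nil => simp [pvEntries]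
  | cons p ps ih =>
    by_cases hp : p = ""
    · subst hp
      rw [pv_entries_empty_cons]
      simp only [List.foldl, if_true]
      exact ih done
    · rw [pv_entries_cons p ps hp]
      simp only [List.foldl_cons]
      rw [if_neg hp, pv_bvariants_eq p]
      simp only [List.foldl_cons, List.foldl_nil]
      rw [pv_pass_step, pv_pass_step, ih]
      simp [List.append_assoc]

-- ===== VERDICT (by name: the statement is the Claim_ definition above) =====
theorem strip_any_prefixes_py_spec : Claim_equal_strip_any_prefixes_py := by
  intro labels prefixes _
  unfold Spec_strip_any_prefixes_py strip_any_prefixes_py strip_any_prefixes_py_alt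
  have hB : prefixes.foldl (fun σ p =>
        if p = "" then σ
        else
          (if PySem.Str.startswith p "delan_" then
             [p, PySem.Str.slice p (some (PySem.Str.len "delan_")) none]
           else [p, String.ofList ("delan_".toList ++ p.toList)]).foldl
            (fun σ v => pvBPass labels p v σ) σ)
      (labels, List.replicate labels.length none, List.range labels.length)
    = pvState labels (pvEntries prefixes) := by
    rw [← pv_state_init labels, pv_b_fold]
    simp
  simp only [hB]
  by_cases hpre : prefixes = []
  · subst hpre
    simp only [if_true]
    rw [show pvEntries ([] : List String) = [] from rfl, pv_state_init labels]
    simp [PySem.List.dedup]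
  · simp only [hpre, if_false]
    have hfun : (fun (acc : List String × List String) s =>
        let r := pvOuterA s none prefixes
        (acc.1 ++ [r.1], if pvTruthy r.2 then acc.2 ++ [r.2.getD ""] else acc.2)) =
        (fun (acc : List String × List String) s =>
          match pvScan s (pvEntries prefixes) with
          | some (st, p) => (acc.1 ++ [st], acc.2 ++ [p])
          | none => (acc.1 ++ [s], acc.2)) :=
      funext fun acc => funext fun s => pv_step_eq prefixes acc s
    rw [hfun, pv_fold_map]
    have hdd := pv_dedup_eq (labels.filterMap (pvG (pvEntries prefixes))) []
    simp only [List.nil_append, PySem.Set.empty] at hdd ⊢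
    rw [hdd]
    unfold pvState
    rw [List.filterMap_map]
    simp [PySem.Set.ofList_eq_foldl, Function.comp]
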